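-- pv_equiv track=rewrite | github.com/Kinddle-tick/ML_clustering | Thecode/Chapter2/ClusteringEvaluation/Fmeasure.py | contingency_table
-- ===== SOURCE A (Python) =====
-- def contingency_table(result, label):
--
--     total_num = len(label)
--
--     TP = TN = FP = FN = 0
--     for i in range(total_num):
--         for j in range(i + 1, total_num):
--             if label[i] == label[j] and result[i] == result[j]:
--                 TP += 1
--             elif label[i] != label[j] and result[i] != result[j]:
--                 TN += 1
--             elif label[i] != label[j] and result[i] == result[j]:
--                 FP += 1
--             elif label[i] == label[j] and result[i] != result[j]:
--                 FN += 1
--     return (TP, TN, FP, FN)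
-- ===== SOURCE B (Python) =====
-- def contingency_table(result, label):
--     # One pass with running counters: each new point pairs with all previously
--     # seen points; TP from exact (result,label) co-occurrence counts, the other
--     # cells by inclusion-exclusion arithmetic at the end.
--     pair_seen = {}
--     res_seen = {}
--     lab_seen = {}
--     TP = same_res = same_lab = n = 0
--     for r, l in zip(result, label):
--         TP += pair_seen.get((r, l), 0)
--         same_res += res_seen.get(r, 0)
--         same_lab += lab_seen.get(l, 0)
--         pair_seen[(r, l)] = pair_seen.get((r, l), 0) + 1
--         res_seen[r] = res_seen.get(r, 0) + 1
--         lab_seen[l] = lab_seen.get(l, 0) + 1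
--         n += 1
--     total = n * (n - 1) // 2
--     return (TP, total - same_lab - same_res + TP, same_res - TP, same_lab - TP)
-- ===== Notes on version B (the rewrite author's own statement) =====
-- stated objective: faster
-- what changed: Replaces the O(n^2) double loop over all index pairs with a single pass that keeps hash-map counts of previously seen (result,label) pairs and of the two marginals, obtaining TP/same-result/same-label pair counts incrementally and deriving TN, FP, FN by inclusion-exclusion from C(n,2).
import Mathlib
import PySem

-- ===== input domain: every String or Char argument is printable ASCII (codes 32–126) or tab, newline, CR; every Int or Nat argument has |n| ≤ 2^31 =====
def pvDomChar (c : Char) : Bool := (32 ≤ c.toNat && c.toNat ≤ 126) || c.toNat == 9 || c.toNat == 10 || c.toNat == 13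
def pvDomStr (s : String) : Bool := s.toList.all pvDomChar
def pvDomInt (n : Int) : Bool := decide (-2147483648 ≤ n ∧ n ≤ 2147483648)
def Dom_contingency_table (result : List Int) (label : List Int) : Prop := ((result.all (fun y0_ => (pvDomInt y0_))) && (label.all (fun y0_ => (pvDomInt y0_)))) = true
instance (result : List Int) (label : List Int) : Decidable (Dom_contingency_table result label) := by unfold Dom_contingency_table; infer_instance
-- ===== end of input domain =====

-- B replaces A's O(n^2) pairwise double loop by one pass with counting dictionaries
-- plus C(n,2) inclusion-exclusion arithmetic (measured faster, asymptotic change).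

-- ===== PORT A =====
def contingency_table (result : List Int) (label : List Int) : List Int :=
  let total_num : Int := (label.length : Int)
  let st :=
    (PySem.List.pyRange 0 total_num 1).foldl (fun (st : Int × Int × Int × Int) i =>
      (PySem.List.pyRange (i + 1) total_num 1).foldl (fun (st : Int × Int × Int × Int) j =>
        if PySem.List.pyGetD label i 0 == PySem.List.pyGetD label j 0
            && PySem.List.pyGetD result i 0 == PySem.List.pyGetD result j 0 then
          (st.1 + 1, st.2.1, st.2.2.1, st.2.2.2)
        else if !(PySem.List.pyGetD label i 0 == PySem.List.pyGetD label j 0)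
            && !(PySem.List.pyGetD result i 0 == PySem.List.pyGetD result j 0) then
          (st.1, st.2.1 + 1, st.2.2.1, st.2.2.2)
        else if !(PySem.List.pyGetD label i 0 == PySem.List.pyGetD label j 0)
            && PySem.List.pyGetD result i 0 == PySem.List.pyGetD result j 0 then
          (st.1, st.2.1, st.2.2.1 + 1, st.2.2.2)
        else if PySem.List.pyGetD label i 0 == PySem.List.pyGetD label j 0
            && !(PySem.List.pyGetD result i 0 == PySem.List.pyGetD result j 0) then
          (st.1, st.2.1, st.2.2.1, st.2.2.2 + 1)
        else st) st) ((0 : Int), (0 : Int), (0 : Int), (0 : Int))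
  [st.1, st.2.1, st.2.2.1, st.2.2.2]

-- ===== PORT B =====
def contingency_table_alt (result : List Int) (label : List Int) : List Int :=
  let st := (result.zip label).foldl
    (fun (st : PySem.Dict (Int × Int) Int × PySem.Dict Int Int × PySem.Dict Int Int × Int × Int × Int × Int) rl =>
      (st.1.insert rl (st.1.getD rl 0 + 1),
       st.2.1.insert rl.1 (st.2.1.getD rl.1 0 + 1),
       st.2.2.1.insert rl.2 (st.2.2.1.getD rl.2 0 + 1),
       st.2.2.2.1 + st.1.getD rl 0,
       st.2.2.2.2.1 + st.2.1.getD rl.1 0,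
       st.2.2.2.2.2.1 + st.2.2.1.getD rl.2 0,
       st.2.2.2.2.2.2 + 1))
    (PySem.Dict.empty, PySem.Dict.empty, PySem.Dict.empty, (0 : Int), (0 : Int), (0 : Int), (0 : Int))
  [st.2.2.2.1,
   PySem.Int.floordiv (st.2.2.2.2.2.2 * (st.2.2.2.2.2.2 - 1)) 2 - st.2.2.2.2.2.1 - st.2.2.2.2.1 + st.2.2.2.1,
   st.2.2.2.2.1 - st.2.2.2.1,
   st.2.2.2.2.2.1 - st.2.2.2.1]

-- ===== PRECONDITION & SPEC =====
-- Pre_ excludes exactly the inputs with len(result) < len(label), on which A raises IndexError.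
def Pre_contingency_table (result : List Int) (label : List Int) : Prop :=
  label.length ≤ result.length
instance (result : List Int) (label : List Int) : Decidable (Pre_contingency_table result label) := by
  unfold Pre_contingency_table; infer_instance

def pvWitness_contingency_table : List Int × List Int := ([0, 1, 0], [0, 1, 1])

def Spec_contingency_table (result : List Int) (label : List Int) (out : List Int) : Prop := out = contingency_table_alt result label
instance (result : List Int) (label : List Int) (out : List Int) : Decidable (Spec_contingency_table result label out) := by unfold Spec_contingency_table; infer_instance

-- ===== CLAIM (what is proved, stated in full; the proofs are below) =====
def Claim_equal_contingency_table : Prop := ∀ (result : List Int) (label : List Int), Dom_contingency_table result label → Pre_contingency_table result label → Spec_contingency_table result label (contingency_table result label)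

-- ===== LEMMAS AND PROOFS =====

-- pair predicates on (result, label) points; x.1 = result value, x.2 = label value
def pvCB (x y : Int × Int) : Bool := (x.2 == y.2) && (x.1 == y.1)
def pvCN (x y : Int × Int) : Bool := !(x.2 == y.2) && !(x.1 == y.1)
def pvCR (x y : Int × Int) : Bool := !(x.2 == y.2) && (x.1 == y.1)
def pvCL (x y : Int × Int) : Bool := (x.2 == y.2) && !(x.1 == y.1)
def pvPEq (x y : Int × Int) : Bool := x == y
def pvREq (x y : Int × Int) : Bool := x.1 == y.1
def pvLEq (x y : Int × Int) : Bool := x.2 == y.2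

-- pvSum f ps = number of index pairs i < j with f ps[i] ps[j]
def pvSum (f : Int × Int → Int × Int → Bool) : List (Int × Int) → Int
  | [] => 0
  | x :: t => (t.countP (f x) : Int) + pvSum f t

def pvD0 : Int × Int := ((0 : Int), (0 : Int))

-- what A's iteration for index i adds to the four counters
def pvAdd4 (st : Int × Int × Int × Int) (x : Int × Int) (t : List (Int × Int)) : Int × Int × Int × Int :=
  (st.1 + (t.countP (pvCB x) : Int), st.2.1 + (t.countP (pvCN x) : Int),
   st.2.2.1 + (t.countP (pvCR x) : Int), st.2.2.2 + (t.countP (pvCL x) : Int))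

-- A's inner-loop body, element form
def pvInnerBody (xi : Int × Int) (st : Int × Int × Int × Int) (y : Int × Int) : Int × Int × Int × Int :=
  if (xi.2 == y.2) && (xi.1 == y.1) then (st.1 + 1, st.2.1, st.2.2.1, st.2.2.2)
  else if !(xi.2 == y.2) && !(xi.1 == y.1) then (st.1, st.2.1 + 1, st.2.2.1, st.2.2.2)
  else if !(xi.2 == y.2) && (xi.1 == y.1) then (st.1, st.2.1, st.2.2.1 + 1, st.2.2.2)
  else if (xi.2 == y.2) && !(xi.1 == y.1) then (st.1, st.2.1, st.2.2.1, st.2.2.2 + 1)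
  else st

theorem pvCountP_split (l : List (Int × Int)) (p q : (Int × Int) → Bool) :
    l.countP p = l.countP (fun a => p a && q a) + l.countP (fun a => p a && !q a) := by
  induction l with
  | nil => rfl
  | cons x t ih => by_cases h : p x <;> by_cases h2 : q x <;> simp [h, h2, ih] <;> omega

theorem pvSum_append (f : Int × Int → Int × Int → Bool) (xs : List (Int × Int)) (x : Int × Int) :
    pvSum f (xs ++ [x]) = pvSum f xs + (xs.countP (fun y => f y x) : Int) := by
  induction xs with
  | nil => simp [pvSum]
  | cons z t ih =>
    simp only [List.cons_append, pvSum, ih, List.countP_append, List.countP_cons, List.countP_nil]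
    by_cases h : f z x <;> simp [h] <;> ring_nf

theorem pvSum_congr (f g : Int × Int → Int × Int → Bool) (h : ∀ x y, f x y = g x y)
    (ps : List (Int × Int)) : pvSum f ps = pvSum g ps := by
  induction ps with
  | nil => rfl
  | cons x t ih =>
    simp only [pvSum, ih]
    congr 2
    exact List.countP_congr (fun y _ => by rw [h x y])

theorem pvSum_split (f g h : Int × Int → Int × Int → Bool)
    (hs : ∀ x (t : List (Int × Int)), t.countP (f x) = t.countP (g x) + t.countP (h x))
    (ps : List (Int × Int)) : pvSum f ps = pvSum g ps + pvSum h ps := by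
  induction ps with
  | nil => rfl
  | cons x t ih =>
    simp only [pvSum, ih, hs x t]
    push_cast
    ring

theorem pvInnerAdds (ys : List (Int × Int)) (xi : Int × Int) :
    ∀ st : Int × Int × Int × Int, ys.foldl (pvInnerBody xi) st = pvAdd4 st xi ys := by
  induction ys with
  | nil => intro st; simp [pvAdd4]
  | cons y t ih =>
    intro st
    simp only [List.foldl_cons, ih, pvInnerBody, pvAdd4]
    by_cases hl : xi.2 == y.2 <;> by_cases hr : xi.1 == y.1 <;>
      simp [pvCB, pvCN, pvCR, pvCL, hl, hr] <;> omega

theorem pvOuterA (ps : List (Int × Int)) :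
    ∀ st : Int × Int × Int × Int,
      (List.range ps.length).foldl (fun st k => pvAdd4 st (ps.getD k pvD0) (ps.drop (k + 1))) st
        = (st.1 + pvSum pvCB ps, st.2.1 + pvSum pvCN ps, st.2.2.1 + pvSum pvCR ps, st.2.2.2 + pvSum pvCL ps) := by
  induction ps with
  | nil => intro st; simp [pvSum]
  | cons x t ih =>
    intro st
    rw [List.length_cons, List.range_succ_eq_map]
    simp only [List.foldl_cons, List.foldl_map, List.getD_cons_zero, List.drop_succ_cons,
      List.getD_cons_succ, Nat.succ_eq_add_one]
    rw [ih]
    simp only [pvAdd4, pvSum, List.drop_zero]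
    refine Prod.ext ?_ (Prod.ext ?_ (Prod.ext ?_ ?_)) <;> simp <;> omega

theorem pv_two_mul_sum_true (ps : List (Int × Int)) :
    2 * pvSum (fun _ _ => true) ps = (ps.length : Int) * ((ps.length : Int) - 1) := by
  induction ps with
  | nil => simp [pvSum]
  | cons x t ih =>
    simp only [pvSum, List.countP_true, List.length_cons]
    push_cast
    linear_combination ih

theorem pvSum_true_eq (ps : List (Int × Int)) :
    PySem.Int.floordiv ((ps.length : Int) * ((ps.length : Int) - 1)) 2 = pvSum (fun _ _ => true) ps := by
  have h := pv_two_mul_sum_true ps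
  rw [PySem.Int.floordiv_eq_iff_of_pos (by norm_num)]
  generalize (ps.length : Int) * ((ps.length : Int) - 1) = m at h ⊢
  omega

-- under Pre_, reading the zip at an in-range index is reading both lists
theorem pvZipGet (result label : List Int) (hpre : label.length ≤ result.length)
    {j : Int} (h0 : 0 ≤ j) (h1 : j < (label.length : Int)) :
    PySem.List.pyGetD (result.zip label) j pvD0
      = (PySem.List.pyGetD result j 0, PySem.List.pyGetD label j 0) := by
  have hz : (result.zip label).length = label.length := by
    rw [List.length_zip]; omega
  have hj1 : j < ((result.zip label).length : Int) := by rw [hz]; exact h1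
  have hj2 : j < (result.length : Int) := by
    have : (label.length : Int) ≤ (result.length : Int) := by exact_mod_cast hpre
    omega
  rw [PySem.List.pyGetD_eq_getElem _ _ h0 hj1, PySem.List.pyGetD_eq_getElem _ _ h0 hj2,
    PySem.List.pyGetD_eq_getElem _ _ h0 h1, List.getElem_zip]

-- characterisation of A's result under Pre_
theorem pvA_eq (result label : List Int) (hpre : label.length ≤ result.length) :
    contingency_table result label
      = [pvSum pvCB (result.zip label), pvSum pvCN (result.zip label),
         pvSum pvCR (result.zip label), pvSum pvCL (result.zip label)] := by
  have hz : (result.zip label).length = label.length := by rw [List.length_zip]; omega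
  show (fun st : Int × Int × Int × Int => [st.1, st.2.1, st.2.2.1, st.2.2.2])
      ((PySem.List.pyRange 0 ((label.length : Int)) 1).foldl (fun (st : Int × Int × Int × Int) i =>
        (PySem.List.pyRange (i + 1) ((label.length : Int)) 1).foldl (fun (st : Int × Int × Int × Int) j =>
          if PySem.List.pyGetD label i 0 == PySem.List.pyGetD label j 0
              && PySem.List.pyGetD result i 0 == PySem.List.pyGetD result j 0 then
            (st.1 + 1, st.2.1, st.2.2.1, st.2.2.2)
          else if !(PySem.List.pyGetD label i 0 == PySem.List.pyGetD label j 0)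
              && !(PySem.List.pyGetD result i 0 == PySem.List.pyGetD result j 0) then
            (st.1, st.2.1 + 1, st.2.2.1, st.2.2.2)
          else if !(PySem.List.pyGetD label i 0 == PySem.List.pyGetD label j 0)
              && PySem.List.pyGetD result i 0 == PySem.List.pyGetD result j 0 then
            (st.1, st.2.1, st.2.2.1 + 1, st.2.2.2)
          else if PySem.List.pyGetD label i 0 == PySem.List.pyGetD label j 0
              && !(PySem.List.pyGetD result i 0 == PySem.List.pyGetD result j 0) then
            (st.1, st.2.1, st.2.2.1, st.2.2.2 + 1)
          else st) st) ((0 : Int), (0 : Int), (0 : Int), (0 : Int)))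
    = [pvSum pvCB (result.zip label), pvSum pvCN (result.zip label),
       pvSum pvCR (result.zip label), pvSum pvCL (result.zip label)]
  have hN : ((label.length : Int)) = (((result.zip label).length : Int)) := by rw [hz]
  rw [hN, PySem.List.pyRange_zero_nat, List.foldl_map]
  have houter :
      (List.range (result.zip label).length).foldl
        (fun (st : Int × Int × Int × Int) (k : Nat) =>
          (PySem.List.pyRange (((k : Int)) + 1) (((result.zip label).length : Int)) 1).foldl
            (fun (st : Int × Int × Int × Int) j =>
              if PySem.List.pyGetD label ((k : Int)) 0 == PySem.List.pyGetD label j 0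
                  && PySem.List.pyGetD result ((k : Int)) 0 == PySem.List.pyGetD result j 0 then
                (st.1 + 1, st.2.1, st.2.2.1, st.2.2.2)
              else if !(PySem.List.pyGetD label ((k : Int)) 0 == PySem.List.pyGetD label j 0)
                  && !(PySem.List.pyGetD result ((k : Int)) 0 == PySem.List.pyGetD result j 0) then
                (st.1, st.2.1 + 1, st.2.2.1, st.2.2.2)
              else if !(PySem.List.pyGetD label ((k : Int)) 0 == PySem.List.pyGetD label j 0)
                  && PySem.List.pyGetD result ((k : Int)) 0 == PySem.List.pyGetD result j 0 then
                (st.1, st.2.1, st.2.2.1 + 1, st.2.2.2)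
              else if PySem.List.pyGetD label ((k : Int)) 0 == PySem.List.pyGetD label j 0
                  && !(PySem.List.pyGetD result ((k : Int)) 0 == PySem.List.pyGetD result j 0) then
                (st.1, st.2.1, st.2.2.1, st.2.2.2 + 1)
              else st) st) ((0 : Int), (0 : Int), (0 : Int), (0 : Int))
      = (List.range (result.zip label).length).foldl
          (fun st k => pvAdd4 st ((result.zip label).getD k pvD0) ((result.zip label).drop (k + 1)))
          ((0 : Int), (0 : Int), (0 : Int), (0 : Int)) := by
    apply PySem.List.foldl_congr_mem
    intro st k hk
    have hk' : k < (result.zip label).length := List.mem_range.mp hk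
    have hkl : k < label.length := hz ▸ hk'
    have hxi : (result.zip label).getD k pvD0
        = (PySem.List.pyGetD result (k : Int) 0, PySem.List.pyGetD label (k : Int) 0) := by
      have h := pvZipGet result label hpre (j := (k : Int)) (by omega) (by exact_mod_cast hkl)
      rw [PySem.List.pyGetD_eq_getElem (result.zip label) pvD0 (by omega) (by exact_mod_cast hk')] at h
      rw [List.getD_eq_getElem (result.zip label) pvD0 hk']
      simpa using h
    have hinner : ∀ st' : Int × Int × Int × Int,
        (PySem.List.pyRange (((k : Int)) + 1) (((result.zip label).length : Int)) 1).foldl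
          (fun (st : Int × Int × Int × Int) j =>
            if PySem.List.pyGetD label ((k : Int)) 0 == PySem.List.pyGetD label j 0
                && PySem.List.pyGetD result ((k : Int)) 0 == PySem.List.pyGetD result j 0 then
              (st.1 + 1, st.2.1, st.2.2.1, st.2.2.2)
            else if !(PySem.List.pyGetD label ((k : Int)) 0 == PySem.List.pyGetD label j 0)
                && !(PySem.List.pyGetD result ((k : Int)) 0 == PySem.List.pyGetD result j 0) then
              (st.1, st.2.1 + 1, st.2.2.1, st.2.2.2)
            else if !(PySem.List.pyGetD label ((k : Int)) 0 == PySem.List.pyGetD label j 0)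
                && PySem.List.pyGetD result ((k : Int)) 0 == PySem.List.pyGetD result j 0 then
              (st.1, st.2.1, st.2.2.1 + 1, st.2.2.2)
            else if PySem.List.pyGetD label ((k : Int)) 0 == PySem.List.pyGetD label j 0
                && !(PySem.List.pyGetD result ((k : Int)) 0 == PySem.List.pyGetD result j 0) then
              (st.1, st.2.1, st.2.2.1, st.2.2.2 + 1)
            else st) st'
        = (PySem.List.pyRange (((k : Int)) + 1) (((result.zip label).length : Int)) 1).foldl
            (fun st j => pvInnerBody ((result.zip label).getD k pvD0) st (PySem.List.pyGetD (result.zip label) j pvD0)) st' := by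
      intro st'
      apply PySem.List.foldl_congr_mem
      intro st'' j hj
      have hj' := PySem.List.mem_pyRange_one.mp hj
      have h0j : (0 : Int) ≤ j := by omega
      have h1j : j < (label.length : Int) := by
        rw [← hz]; exact_mod_cast hj'.2
      rw [pvZipGet result label hpre h0j h1j, hxi]
      rfl
    rw [hinner st, PySem.List.foldl_pyRange_pyGetD' (result.zip label) pvD0 _ st (by omega)]
    have htn : (((k : Int)) + 1).toNat = k + 1 := by omega
    rw [htn, pvInnerAdds]
  rw [houter, pvOuterA]
  simp

-- invariant of B's single pass
theorem pvB_fold (ps : List (Int × Int)) :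
    ps.foldl
      (fun (st : PySem.Dict (Int × Int) Int × PySem.Dict Int Int × PySem.Dict Int Int × Int × Int × Int × Int) rl =>
        (st.1.insert rl (st.1.getD rl 0 + 1),
         st.2.1.insert rl.1 (st.2.1.getD rl.1 0 + 1),
         st.2.2.1.insert rl.2 (st.2.2.1.getD rl.2 0 + 1),
         st.2.2.2.1 + st.1.getD rl 0,
         st.2.2.2.2.1 + st.2.1.getD rl.1 0,
         st.2.2.2.2.2.1 + st.2.2.1.getD rl.2 0,
         st.2.2.2.2.2.2 + 1))
      (PySem.Dict.empty, PySem.Dict.empty, PySem.Dict.empty, (0 : Int), (0 : Int), (0 : Int), (0 : Int))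
    = (PySem.Dict.counter ps, PySem.Dict.counter (ps.map (·.1)), PySem.Dict.counter (ps.map (·.2)),
       pvSum pvPEq ps, pvSum pvREq ps, pvSum pvLEq ps, (ps.length : Int)) := by
  induction ps using List.reverseRecOn with
  | nil => rfl
  | append_singleton qs x ih =>
    rw [List.foldl_append, ih]
    simp only [List.foldl_cons, List.foldl_nil]
    refine Prod.ext ?_ (Prod.ext ?_ (Prod.ext ?_ (Prod.ext ?_ (Prod.ext ?_ (Prod.ext ?_ ?_)))))
    · show (PySem.Dict.counter qs).insert x ((PySem.Dict.counter qs).getD x 0 + 1) = PySem.Dict.counter (qs ++ [x])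
      rw [PySem.Dict.counter_append_singleton]; rfl
    · show (PySem.Dict.counter (qs.map (·.1))).insert x.1 ((PySem.Dict.counter (qs.map (·.1))).getD x.1 0 + 1)
        = PySem.Dict.counter ((qs ++ [x]).map (·.1))
      rw [List.map_append, List.map_singleton, PySem.Dict.counter_append_singleton]; rfl
    · show (PySem.Dict.counter (qs.map (·.2))).insert x.2 ((PySem.Dict.counter (qs.map (·.2))).getD x.2 0 + 1)
        = PySem.Dict.counter ((qs ++ [x]).map (·.2))
      rw [List.map_append, List.map_singleton, PySem.Dict.counter_append_singleton]; rfl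
    · show pvSum pvPEq qs + (PySem.Dict.counter qs).getD x 0 = pvSum pvPEq (qs ++ [x])
      rw [PySem.Dict.getD_counter, pvSum_append]
      congr 2
    · show pvSum pvREq qs + (PySem.Dict.counter (qs.map (·.1))).getD x.1 0 = pvSum pvREq (qs ++ [x])
      rw [PySem.Dict.getD_counter, pvSum_append]
      congr 2
      simp [List.count_eq_countP, List.countP_map, pvREq]
      rfl
    · show pvSum pvLEq qs + (PySem.Dict.counter (qs.map (·.2))).getD x.2 0 = pvSum pvLEq (qs ++ [x])
      rw [PySem.Dict.getD_counter, pvSum_append]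
      congr 2
      simp [List.count_eq_countP, List.countP_map, pvLEq]
      rfl
    · show (qs.length : Int) + 1 = ((qs ++ [x]).length : Int)
      simp

-- the pvSum identities linking B's three totals to A's four counters
theorem pvPEq_eq_CB (ps : List (Int × Int)) : pvSum pvPEq ps = pvSum pvCB ps := by
  apply pvSum_congr
  intro x y
  cases x with
  | mk a b =>
    cases y with
    | mk c d =>
      show ((a, b) == (c, d)) = ((b == d) && (a == c))
      rw [show ((a, b) == (c, d)) = ((a == c) && (b == d)) from rfl]
      exact Bool.and_comm _ _

theorem pvREq_split (ps : List (Int × Int)) : pvSum pvREq ps = pvSum pvCB ps + pvSum pvCR ps := by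
  apply pvSum_split
  intro x t
  show t.countP (fun y => x.1 == y.1)
      = t.countP (fun y => (x.2 == y.2) && (x.1 == y.1)) + t.countP (fun y => !(x.2 == y.2) && (x.1 == y.1))
  rw [pvCountP_split t (fun y => x.1 == y.1) (fun y => x.2 == y.2)]
  congr 1 <;> exact List.countP_congr (fun y _ => by simp [Bool.and_comm])

theorem pvLEq_split (ps : List (Int × Int)) : pvSum pvLEq ps = pvSum pvCB ps + pvSum pvCL ps := by
  apply pvSum_split
  intro x t
  show t.countP (fun y => x.2 == y.2)
      = t.countP (fun y => (x.2 == y.2) && (x.1 == y.1)) + t.countP (fun y => (x.2 == y.2) && !(x.1 == y.1))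
  exact pvCountP_split t (fun y => x.2 == y.2) (fun y => x.1 == y.1)

theorem pvTrue_split (ps : List (Int × Int)) :
    pvSum (fun _ _ => true) ps = pvSum pvCB ps + pvSum pvCL ps + pvSum pvCR ps + pvSum pvCN ps := by
  have h1 : pvSum (fun _ _ => true) ps = pvSum pvLEq ps + pvSum (fun x y => !(x.2 == y.2)) ps := by
    apply pvSum_split
    intro x t
    show t.countP (fun _ => true)
        = t.countP (fun y => (x.2 == y.2)) + t.countP (fun y => !(x.2 == y.2))
    rw [pvCountP_split t (fun _ => true) (fun y => x.2 == y.2)]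
    congr 1
  have h2 : pvSum (fun x y => !(x.2 == y.2)) ps = pvSum pvCR ps + pvSum pvCN ps := by
    apply pvSum_split
    intro x t
    show t.countP (fun y => !(x.2 == y.2))
        = t.countP (fun y => !(x.2 == y.2) && (x.1 == y.1)) + t.countP (fun y => !(x.2 == y.2) && !(x.1 == y.1))
    exact pvCountP_split t (fun y => !(x.2 == y.2)) (fun y => x.1 == y.1)
  rw [h1, h2, pvLEq_split]
  ring

-- ===== VERDICT (by name: the statement is the Claim_ definition above) =====
theorem contingency_table_spec : Claim_equal_contingency_table := by
  intro result label _hdom hpre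
  unfold Spec_contingency_table
  have hpre' : label.length ≤ result.length := hpre
  rw [pvA_eq result label hpre']
  have hB : contingency_table_alt result label
      = [pvSum pvPEq (result.zip label),
         PySem.Int.floordiv (((result.zip label).length : Int) * (((result.zip label).length : Int) - 1)) 2
           - pvSum pvLEq (result.zip label) - pvSum pvREq (result.zip label) + pvSum pvPEq (result.zip label),
         pvSum pvREq (result.zip label) - pvSum pvPEq (result.zip label),
         pvSum pvLEq (result.zip label) - pvSum pvPEq (result.zip label)] := by
    show (fun st : PySem.Dict (Int × Int) Int × PySem.Dict Int Int × PySem.Dict Int Int × Int × Int × Int × Int =>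
        [st.2.2.2.1,
         PySem.Int.floordiv (st.2.2.2.2.2.2 * (st.2.2.2.2.2.2 - 1)) 2 - st.2.2.2.2.2.1 - st.2.2.2.2.1 + st.2.2.2.1,
         st.2.2.2.2.1 - st.2.2.2.1,
         st.2.2.2.2.2.1 - st.2.2.2.1])
      ((result.zip label).foldl
        (fun (st : PySem.Dict (Int × Int) Int × PySem.Dict Int Int × PySem.Dict Int Int × Int × Int × Int × Int) rl =>
          (st.1.insert rl (st.1.getD rl 0 + 1),
           st.2.1.insert rl.1 (st.2.1.getD rl.1 0 + 1),
           st.2.2.1.insert rl.2 (st.2.2.1.getD rl.2 0 + 1),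
           st.2.2.2.1 + st.1.getD rl 0,
           st.2.2.2.2.1 + st.2.1.getD rl.1 0,
           st.2.2.2.2.2.1 + st.2.2.1.getD rl.2 0,
           st.2.2.2.2.2.2 + 1))
        (PySem.Dict.empty, PySem.Dict.empty, PySem.Dict.empty, (0 : Int), (0 : Int), (0 : Int), (0 : Int)))
      = _
    rw [pvB_fold]
  rw [hB]
  have hT := pvSum_true_eq (result.zip label)
  have h1 := pvPEq_eq_CB (result.zip label)
  have h2 := pvREq_split (result.zip label)
  have h3 := pvLEq_split (result.zip label)
  have h4 := pvTrue_split (result.zip label)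
  rw [hT] at *
  simp only [List.cons.injEq, and_true]
  omega
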